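-- pv_equiv track=rewrite | github.com/aseelbdoor/data-structures-and-algorithms | python/array_insert_shift/array_insert_shift.py | insertShiftArray
-- ===== SOURCE A (Python) =====
-- import math
--
-- def insertShiftArray(list,n):
--     location=math.ceil(len(list)/2)
--     newList=[]
--     for i in range(0,len(list)):
--         if i==location:
--             newList.append(n)
--         newList.append(list[i])
--     else:
--         if (len(newList)-1)<location:
--             newList.append(n)
--     return newList
-- ===== SOURCE B (Python) =====
-- import math
--
-- def insertShiftArray(list, n):
--     location = math.ceil(len(list) / 2)
--     lst = [*list]
--     return lst[:location] + [n] + lst[location:]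
-- ===== Notes on version B (the rewrite author's own statement) =====
-- stated objective: simpler
-- what changed: Replaced the element-by-element append loop with a for-else fix-up by a single closed-form slice splice lst[:location] + [n] + lst[location:].
import Mathlib
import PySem

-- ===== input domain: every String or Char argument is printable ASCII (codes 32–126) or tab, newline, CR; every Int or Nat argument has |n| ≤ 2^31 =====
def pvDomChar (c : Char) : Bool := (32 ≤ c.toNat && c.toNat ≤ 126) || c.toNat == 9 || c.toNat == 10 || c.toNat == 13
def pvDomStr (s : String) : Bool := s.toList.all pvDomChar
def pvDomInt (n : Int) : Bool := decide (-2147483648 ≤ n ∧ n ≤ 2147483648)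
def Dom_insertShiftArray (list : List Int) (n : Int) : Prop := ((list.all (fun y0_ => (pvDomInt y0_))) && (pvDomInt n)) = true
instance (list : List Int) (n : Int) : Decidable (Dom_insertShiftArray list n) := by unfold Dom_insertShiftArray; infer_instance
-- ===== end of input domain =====

-- B replaces A's append loop + for-else fix-up by a closed-form slice splice (objective: simpler).


-- ===== PORT A =====
-- location = math.ceil(len(list)/2) is exact on lists of ints: it equals (len+1) // 2.
-- list[i] inside the loop is always in range (i < len), so getD is exact there.
def insertShiftArray (list : List Int) (n : Int) : List Int :=
  let location : Nat := (list.length + 1) / 2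
  let newList : List Int :=
    (List.range list.length).foldl
      (fun acc i => (if i = location then acc ++ [n] else acc) ++ [list.getD i 0]) []
  if (newList.length : Int) - 1 < (location : Int) then newList ++ [n] else newList

-- ===== PORT B =====
def insertShiftArray_alt (list : List Int) (n : Int) : List Int :=
  let location : Nat := (list.length + 1) / 2
  PySem.List.slice list none (some (location : Int)) ++ [n]
    ++ PySem.List.slice list (some (location : Int)) none

-- ===== PRECONDITION & SPEC =====
def Spec_insertShiftArray (list : List Int) (n : Int) (out : List Int) : Prop := out = insertShiftArray_alt list n
instance (list : List Int) (n : Int) (out : List Int) : Decidable (Spec_insertShiftArray list n out) := by unfold Spec_insertShiftArray; infer_instance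

-- ===== CLAIM (what is proved, stated in full; the proofs are below) =====
def Claim_equal_insertShiftArray : Prop := ∀ (list : List Int) (n : Int), Dom_insertShiftArray list n → Spec_insertShiftArray list n (insertShiftArray list n)

-- ===== LEMMAS AND PROOFS =====

-- Loop invariant for A's for-loop: after m iterations the accumulator is
-- take m with n spliced in at loc if the loop already passed loc, else just take m.
theorem insertShiftArray_loop (list : List Int) (n : Int) (loc : Nat) :
    ∀ m, m ≤ list.length →
      (List.range m).foldl
        (fun acc i => (if i = loc then acc ++ [n] else acc) ++ [list.getD i 0]) []
      = if loc < m then list.take loc ++ n :: ((list.take m).drop loc) else list.take m := by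
  intro m
  induction m with
  | zero => simp
  | succ m ih =>
    intro hm
    have hm' : m ≤ list.length := Nat.le_of_succ_le hm
    have hlt : m < list.length := hm
    rw [List.range_succ, List.foldl_append, ih hm']
    have htake : list.take (m + 1) = list.take m ++ [list.getD m 0] := by
      rw [List.take_add_one]
      congr 1
      simp [List.getD, List.getElem?_eq_getElem hlt]
    rcases lt_trichotomy loc m with h | h | h
    · have h1 : loc < m + 1 := Nat.lt_succ_of_lt h
      simp only [List.foldl_cons, List.foldl_nil, if_pos h, if_pos h1,
        if_neg (Nat.ne_of_gt h)]
      rw [htake, List.drop_append_of_le_length (by simp; omega)]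
      simp
    · subst h
      simp only [List.foldl_cons, List.foldl_nil, if_neg (Nat.lt_irrefl loc),
        if_pos (Nat.lt_succ_self loc)]
      rw [htake, List.drop_append_of_le_length (by simp; omega)]
      simp

    · have h1 : ¬ loc < m := by omega
      have h2 : ¬ loc < m + 1 := by omega
      have h3 : m ≠ loc := by omega
      simp only [List.foldl_cons, List.foldl_nil, if_neg h1, if_neg h2, if_neg h3]
      exact htake.symm

-- ===== VERDICT (by name: the statement is the Claim_ definition above) =====
theorem insertShiftArray_spec : Claim_equal_insertShiftArray := by
  intro list n _
  unfold Spec_insertShiftArray insertShiftArray insertShiftArray_alt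
  simp only []
  set loc : Nat := (list.length + 1) / 2 with hloc
  rw [insertShiftArray_loop list n loc list.length (le_refl _)]
  rw [PySem.List.slice_to_natCast, PySem.List.slice_from_natCast]
  by_cases h : loc < list.length
  · have hLen : (list.take loc ++ n :: ((list.take list.length).drop loc)).length
        = list.length + 1 := by
      simp
    rw [if_pos h, if_neg (by rw [hLen]; push_cast; omega)]
    simp
  · have hle : list.length ≤ loc := Nat.le_of_not_lt h
    have hlen01 : list.length ≤ 1 := by omega
    rw [if_neg h]
    have hEq : list.take loc = list := List.take_of_length_le (by omega)
    have hDrop : list.drop loc = [] := List.drop_eq_nil_of_le (by omega)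
    rw [if_pos (by simp; omega)]
    simp [hEq, hDrop]
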